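-- pv_equiv track=rewrite | github.com/JohnCB2033/NBA-Stats | webapp/dbquery.py | display_info
-- ===== SOURCE A (Python) =====
-- def display_info(longest_vals, top_row, players):
--     #creating and displaying top row and seperator lines
--     top_row_display = ''
--     seperator = ''
--     for stat in range(0, len(top_row)):
--         top_row_display += ' | ' + top_row[stat] + " "*(longest_vals[stat] - len(top_row[stat]))
--         seperator += '+' + "-"*(longest_vals[stat]+2)
--     top_row_display += " |"
--     seperator += "+"
--     top_row_display = top_row_display[1:]
--     #displaying player info
--     t = 0
--     result = [seperator]
--     for player in players:
--         if t%20 == 0: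
--             result.append(top_row_display)
--             result.append(seperator)
--         player_display = ''
--         i = 0
--         for stat in player:
--             player_display += ' | ' + stat + " "*(longest_vals[i] - len(stat))
--             i +=1
--         player_display += " |"
--         player_display = player_display[1:]
--         result.append(player_display)
--         result.append(seperator)
--         t+=1
--     return result
-- ===== SOURCE B (Python) =====
-- def display_info(longest_vals, top_row, players):
--     widths = longest_vals[:len(top_row)]
--     sep = '+' + ''.join('-' * (w + 2) + '+' for w in widths)
--
--     def row(cells):
--         return '|' + ''.join(' ' + s.ljust(w) + ' |' for s, w in zip(cells, longest_vals))
--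
--     header = row(top_row)
--     out = [sep]
--     rest = players
--     while rest:
--         page, rest = rest[:20], rest[20:]
--         out.append(header)
--         out.append(sep)
--         for p in page:
--             out.append(row(p))
--             out.append(sep)
--     return out
-- ===== Notes on version B (the rewrite author's own statement) =====
-- stated objective: simpler
-- what changed: B slices players into pages of 20 up front (rest[:20]/rest[20:]) emitting the prebuilt header and separator once per page, instead of A's flat loop with a running counter t and a t%20==0 test, and builds each row/separator by zip+ljust+join instead of A's index-threaded string concatenation with a manual [1:] trim.
import Mathlib
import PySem

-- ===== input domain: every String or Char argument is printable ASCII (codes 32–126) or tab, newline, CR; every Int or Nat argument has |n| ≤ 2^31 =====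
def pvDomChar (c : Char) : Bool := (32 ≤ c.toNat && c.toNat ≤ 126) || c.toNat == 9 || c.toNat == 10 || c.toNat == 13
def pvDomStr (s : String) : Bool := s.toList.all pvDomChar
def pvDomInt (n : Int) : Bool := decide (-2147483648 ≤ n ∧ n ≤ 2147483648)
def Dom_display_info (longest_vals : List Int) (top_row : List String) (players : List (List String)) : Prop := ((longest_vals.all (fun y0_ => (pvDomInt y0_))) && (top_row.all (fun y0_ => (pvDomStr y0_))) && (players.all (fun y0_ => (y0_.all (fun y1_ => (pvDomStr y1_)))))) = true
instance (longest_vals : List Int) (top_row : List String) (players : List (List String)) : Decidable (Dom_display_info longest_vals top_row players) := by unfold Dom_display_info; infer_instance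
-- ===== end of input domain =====

-- B replaces A's flat counter-driven loop (t, t%20==0) by slicing players into pages of 20 and
-- building each row by zip/ljust/join instead of index-threaded string concatenation; objective: simpler, not faster.

-- ===== PORT A =====
-- " "*n / "-"*n : Python string repetition (n ≤ 0 gives the empty string) — exact
def pvRepA (c : Char) (n : Int) : List Char := List.replicate n.toNat c

def display_info (longest_vals : List Int) (top_row : List String) (players : List (List String)) : List String :=
  let hs := (PySem.List.pyRange 0 (top_row.length : Int) 1).foldl
    (fun (acc : List Char × List Char) stat =>
      (acc.1 ++ (" | ".toList ++ (PySem.List.pyGetD top_row stat "").toList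
          ++ pvRepA ' ' (PySem.List.pyGetD longest_vals stat 0 - ((PySem.List.pyGetD top_row stat "").toList.length : Int))),
       acc.2 ++ ('+' :: pvRepA '-' (PySem.List.pyGetD longest_vals stat 0 + 2)))) ([], [])
  let top_row_display := PySem.List.slice (hs.1 ++ " |".toList) (some 1) none
  let seperator := hs.2 ++ ['+']
  let final := players.foldl
    (fun (st : Int × List String) player =>
      (st.1 + 1,
       (if PySem.Int.mod st.1 20 == 0 then st.2 ++ [String.ofList top_row_display, String.ofList seperator] else st.2)
         ++ [String.ofList (PySem.List.slice
              ((player.foldl (fun (q : List Char × Int) stat =>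
                  (q.1 ++ (" | ".toList ++ stat.toList
                      ++ pvRepA ' ' (PySem.List.pyGetD longest_vals q.2 0 - (stat.toList.length : Int))),
                   q.2 + 1)) ([], 0)).1 ++ " |".toList) (some 1) none),
             String.ofList seperator]))
    ((0 : Int), [String.ofList seperator])
  final.2

-- ===== PORT B =====
-- s.ljust(w) : pad with spaces to width w (never truncates; w ≤ len(s) leaves s unchanged) — exact
def pvLjust (s : List Char) (w : Int) : List Char := s ++ List.replicate (w.toNat - s.length) ' '

def pvRowB (longest_vals : List Int) (cells : List String) : List Char :=
  '|' :: ((cells.zip longest_vals).map (fun sw => ' ' :: (pvLjust sw.1.toList sw.2 ++ " |".toList))).flatten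

def pvPages (header sep : String) (rowf : List String → String) : List (List String) → List String
  | [] => []
  | p :: ps =>
      [header, sep]
        ++ (PySem.List.slice (p :: ps) none (some 20)).flatMap (fun q => [rowf q, sep])
        ++ pvPages header sep rowf (PySem.List.slice (p :: ps) (some 20) none)
  termination_by rest => rest.length
  decreasing_by
    rw [PySem.List.slice_from _ (by norm_num)]
    simp

def display_info_alt (longest_vals : List Int) (top_row : List String) (players : List (List String)) : List String :=
  let widths := PySem.List.slice longest_vals none (some (top_row.length : Int))
  let sep := String.ofList ('+' :: (widths.map (fun w => List.replicate (w + 2).toNat '-' ++ ['+'])).flatten)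
  let header := String.ofList (pvRowB longest_vals top_row)
  sep :: pvPages header sep (fun p => String.ofList (pvRowB longest_vals p)) players

-- ===== PRECONDITION & SPEC =====
-- Pre_ excludes exactly the inputs where Python A raises IndexError: a header or a player row
-- longer than longest_vals (A indexes longest_vals[stat] per column).
def Pre_display_info (longest_vals : List Int) (top_row : List String) (players : List (List String)) : Prop :=
  top_row.length ≤ longest_vals.length ∧ ∀ p ∈ players, p.length ≤ longest_vals.length
instance (longest_vals : List Int) (top_row : List String) (players : List (List String)) : Decidable (Pre_display_info longest_vals top_row players) := by unfold Pre_display_info; infer_instance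

def pvWitness_display_info : List Int × List String × List (List String) :=
  ([5, 3], ["Name", "Pts"], [["Bob", "7"], ["Al", ""]])

def Spec_display_info (longest_vals : List Int) (top_row : List String) (players : List (List String)) (out : List String) : Prop := out = display_info_alt longest_vals top_row players
instance (longest_vals : List Int) (top_row : List String) (players : List (List String)) (out : List String) : Decidable (Spec_display_info longest_vals top_row players out) := by unfold Spec_display_info; infer_instance

-- ===== CLAIM (what is proved, stated in full; the proofs are below) =====
def Claim_equal_display_info : Prop := ∀ (longest_vals : List Int) (top_row : List String) (players : List (List String)), Dom_display_info longest_vals top_row players → Pre_display_info longest_vals top_row players → Spec_display_info longest_vals top_row players (display_info longest_vals top_row players)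


-- ===== LEMMAS AND PROOFS =====

-- the common " <cell padded to width> " shape both row builders produce per column
def pvCell (sw : String × Int) : List Char :=
  ' ' :: (sw.1.toList ++ List.replicate (sw.2 - (sw.1.toList.length : Int)).toNat ' ')

-- A's main loop, abstracted: counter-driven emission with a header every 20 rows
def pvGoA (header sep : String) (rowf : List String → String) : List (List String) → Nat → List String
  | [], _ => []
  | p :: ps, t =>
      (if t % 20 = 0 then [header, sep] else []) ++ ([rowf p, sep] ++ pvGoA header sep rowf ps (t + 1))

lemma pvTl1 : " | ".toList = [' ', '|', ' '] := rfl
lemma pvTl2 : " |".toList = [' ', '|'] := rfl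

-- moving the shared delimiter from the front of every block to its back
lemma pvShift {α : Type} (x : List Char) (g : α → List Char) (l : List α) :
    (l.map (fun e => x ++ g e)).flatten ++ x = x ++ (l.map (fun e => g e ++ x)).flatten := by
  induction l with
  | nil => simp
  | cons e l ih =>
      simp only [List.map_cons, List.flatten_cons, List.append_assoc] at *
      rw [ih]

lemma pvSepEq (lv : List Int) (n : Nat) :
    ((lv.take n).map (fun w => '+' :: List.replicate (w + 2).toNat '-')).flatten ++ ['+']
      = '+' :: ((lv.take n).map (fun w => List.replicate (w + 2).toNat '-' ++ ['+'])).flatten := by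
  have h := pvShift ['+'] (fun w => List.replicate (w + 2).toNat '-') (lv.take n)
  simpa using h

lemma pvRowEq (lv : List Int) (p : List String) :
    PySem.List.slice ((((p.zip lv).map (fun sw => " |".toList ++ pvCell sw)).flatten) ++ " |".toList)
        (some 1) none
      = pvRowB lv p := by
  rw [PySem.List.slice_from _ (by norm_num), pvShift " |".toList pvCell (p.zip lv)]
  have hm : (p.zip lv).map (fun sw => pvCell sw ++ " |".toList)
      = (p.zip lv).map (fun sw => ' ' :: (pvLjust sw.1.toList sw.2 ++ " |".toList)) := by
    refine List.map_congr_left (fun sw _ => ?_)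
    simp [pvCell, pvLjust]
  rw [hm, pvTl2]
  simp [pvRowB]

lemma pvRowA_foldl (lv : List Int) :
    ∀ (p : List String) (k : Nat) (acc : List Char), k + p.length ≤ lv.length →
    (p.foldl (fun (q : List Char × Int) stat =>
        (q.1 ++ (" | ".toList ++ stat.toList
            ++ pvRepA ' ' (PySem.List.pyGetD lv q.2 0 - (stat.toList.length : Int))),
         q.2 + 1)) (acc, ((k : Nat) : Int))).1
      = acc ++ ((p.zip (lv.drop k)).map (fun sw => " |".toList ++ pvCell sw)).flatten := by
  intro p
  induction p with
  | nil => intro k acc _; simp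
  | cons s p ih =>
      intro k acc h
      have hk : k < lv.length := by simp at h; omega
      have hdrop : lv.drop k = lv[k] :: lv.drop (k + 1) := List.drop_eq_getElem_cons hk
      have hcast : ((k : Nat) : Int) + 1 = (((k + 1 : Nat)) : Int) := by push_cast; ring
      simp only [List.foldl_cons, hcast]
      rw [ih (k + 1) _ (by simp at h ⊢; omega)]
      rw [PySem.List.pyGetD_natCast lv k 0, List.getD_eq_getElem lv 0 hk]
      rw [hdrop]
      simp only [List.zip_cons_cons, List.map_cons, List.flatten_cons]
      simp [pvCell, pvRepA, pvTl1, pvTl2]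

lemma pvRowA0 (lv : List Int) (p : List String) (h : p.length ≤ lv.length) :
    (p.foldl (fun (q : List Char × Int) stat =>
        (q.1 ++ (" | ".toList ++ stat.toList
            ++ pvRepA ' ' (PySem.List.pyGetD lv q.2 0 - (stat.toList.length : Int))),
         q.2 + 1)) (([] : List Char), (0 : Int))).1
      = ((p.zip lv).map (fun sw => " |".toList ++ pvCell sw)).flatten := by
  have h0 := pvRowA_foldl lv p 0 [] (by simpa)
  simpa using h0

lemma pvHdr_foldl (lv : List Int) (tr : List String) :
    ∀ (n : Nat), n ≤ tr.length → n ≤ lv.length → ∀ (a b : List Char),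
    (((List.range n).map (fun (k : Nat) => (k : Int))).foldl
      (fun (acc : List Char × List Char) stat =>
        (acc.1 ++ (" | ".toList ++ (PySem.List.pyGetD tr stat "").toList
            ++ pvRepA ' ' (PySem.List.pyGetD lv stat 0 - ((PySem.List.pyGetD tr stat "").toList.length : Int))),
         acc.2 ++ ('+' :: pvRepA '-' (PySem.List.pyGetD lv stat 0 + 2)))) (a, b))
      = (a ++ (((tr.zip lv).take n).map (fun sw => " |".toList ++ pvCell sw)).flatten,
         b ++ ((lv.take n).map (fun w => '+' :: List.replicate (w + 2).toNat '-')).flatten) := by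
  intro n
  induction n with
  | zero => intro _ _ a b; simp
  | succ n ih =>
      intro h1 h2 a b
      have hn1 : n < tr.length := by omega
      have hn2 : n < lv.length := by omega
      rw [List.range_succ, List.map_append, List.foldl_append]
      rw [ih (by omega) (by omega) a b]
      simp only [List.map_cons, List.map_nil, List.foldl_cons, List.foldl_nil]
      rw [PySem.List.pyGetD_natCast tr n "", PySem.List.pyGetD_natCast lv n 0,
        List.getD_eq_getElem tr "" hn1, List.getD_eq_getElem lv 0 hn2]
      have hz : n < (tr.zip lv).length := by simp [List.length_zip]; omega
      have hzip : (tr.zip lv).take (n + 1) = (tr.zip lv).take n ++ [(tr[n], lv[n])] := by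
        rw [List.take_add_one, List.getElem?_eq_getElem hz, List.getElem_zip]
        simp
      have hlv : lv.take (n + 1) = lv.take n ++ [lv[n]] := by
        rw [List.take_add_one, List.getElem?_eq_getElem hn2]
        simp
      rw [hzip, hlv]
      simp only [List.map_append, List.map_cons, List.map_nil, List.flatten_append,
        List.flatten_cons, List.flatten_nil, Prod.mk.injEq, List.append_nil, List.append_assoc]
      refine ⟨?_, ?_⟩
      · simp [pvCell, pvRepA, pvTl1, pvTl2]
      · simp [pvRepA]

lemma pvLoop_foldl (lv : List Int) (hdr sep : String) :
    ∀ (ps : List (List String)) (t : Nat) (res : List String),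
    ps.foldl (fun (st : Int × List String) player =>
      (st.1 + 1,
       (if PySem.Int.mod st.1 20 == 0 then st.2 ++ [hdr, sep] else st.2)
         ++ [String.ofList (PySem.List.slice
              ((player.foldl (fun (q : List Char × Int) stat =>
                  (q.1 ++ (" | ".toList ++ stat.toList
                      ++ pvRepA ' ' (PySem.List.pyGetD lv q.2 0 - (stat.toList.length : Int))),
                   q.2 + 1)) ([], 0)).1 ++ " |".toList) (some 1) none),
             sep])) (((t : Nat) : Int), res)
      = ((((t + ps.length : Nat)) : Int),
         res ++ pvGoA hdr sep (fun player => String.ofList (PySem.List.slice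
              ((player.foldl (fun (q : List Char × Int) stat =>
                  (q.1 ++ (" | ".toList ++ stat.toList
                      ++ pvRepA ' ' (PySem.List.pyGetD lv q.2 0 - (stat.toList.length : Int))),
                   q.2 + 1)) ([], 0)).1 ++ " |".toList) (some 1) none)) ps t) := by
  intro ps
  induction ps with
  | nil => intro t res; simp [pvGoA]
  | cons p ps ih =>
      intro t res
      have hcast : ((t : Nat) : Int) + 1 = (((t + 1 : Nat)) : Int) := by push_cast; ring
      have hmodc : PySem.Int.mod ((t : Nat) : Int) 20 = ((t % 20 : Nat) : Int) := by
        rw [show (20 : Int) = ((20 : Nat) : Int) by norm_num, PySem.Int.mod_natCast]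
      simp only [List.foldl_cons, hcast, hmodc]
      rw [ih (t + 1)]
      simp only [Prod.mk.injEq]
      refine ⟨by simp only [List.length_cons]; push_cast; omega, ?_⟩
      simp only [pvGoA, beq_iff_eq, Nat.cast_eq_zero]
      by_cases hmod : t % 20 = 0
      · simp [hmod, List.append_assoc]
      · simp [hmod, List.append_assoc]

lemma pvGoA_congr (h s : String) (r r' : List String → String) :
    ∀ ps (t : Nat), (∀ p ∈ ps, r p = r' p) → pvGoA h s r ps t = pvGoA h s r' ps t := by
  intro ps
  induction ps with
  | nil => intro t _; rfl
  | cons p ps ih =>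
      intro t hr
      simp only [pvGoA]
      rw [hr p (by simp), ih (t + 1) (fun q hq => hr q (by simp [hq]))]

lemma pvGoA_mod (h s : String) (r : List String → String) :
    ∀ ps (m n : Nat), m % 20 = n % 20 → pvGoA h s r ps m = pvGoA h s r ps n := by
  intro ps
  induction ps with
  | nil => intro m n _; rfl
  | cons p ps ih =>
      intro m n hmn
      simp only [pvGoA, hmn]
      rw [ih (m + 1) (n + 1) (by omega)]

lemma pvGoA_run (h s : String) (r : List String → String) :
    ∀ (k : Nat) ps (t : Nat), 0 < t % 20 → t % 20 + k ≤ 20 →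
    pvGoA h s r ps t
      = (ps.take k).flatMap (fun p => [r p, s]) ++ pvGoA h s r (ps.drop k) (t + k) := by
  intro k
  induction k with
  | zero => intro ps t _ _; simp
  | succ k ih =>
      intro ps t ht hk
      cases ps with
      | nil => simp [pvGoA]
      | cons p ps =>
          have hne : ¬ (t % 20 = 0) := by omega
          simp only [pvGoA, if_neg hne, List.take_succ_cons, List.drop_succ_cons,
            List.flatMap_cons, List.nil_append]
          rcases Nat.eq_zero_or_pos k with hk0 | hkpos
          · subst hk0
            simp
          · rw [ih ps (t + 1) (by omega) (by omega)]
            have ht1 : t + 1 + k = t + (k + 1) := by omega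
            rw [ht1]
            simp

lemma pvPages_cons (h s : String) (r : List String → String) (p : List String) (ps : List (List String)) :
    pvPages h s r (p :: ps)
      = [h, s] ++ ((p :: ps).take 20).flatMap (fun q => [r q, s]) ++ pvPages h s r ((p :: ps).drop 20) := by
  rw [pvPages]
  rw [PySem.List.slice_to _ (by norm_num : (0:Int) ≤ 20), PySem.List.slice_from _ (by norm_num : (0:Int) ≤ 20)]
  rw [show Int.toNat 20 = 20 from rfl]

lemma pvGoA_pages (h s : String) (r : List String → String) :
    ∀ (n : Nat) ps, ps.length ≤ n → pvGoA h s r ps 0 = pvPages h s r ps := by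
  intro n
  induction n with
  | zero =>
      intro ps hps
      have hnil : ps = [] := List.length_eq_zero_iff.mp (by omega)
      subst hnil
      simp [pvGoA, pvPages]
  | succ n ih =>
      intro ps hps
      cases ps with
      | nil => simp [pvGoA, pvPages]
      | cons p ps =>
          rw [pvPages_cons]
          simp only [pvGoA]
          rw [pvGoA_run h s r 19 ps 1 (by norm_num) (by norm_num)]
          rw [show (1 + 19 : Nat) = 20 by norm_num]
          rw [pvGoA_mod h s r _ 20 0 (by norm_num), ih _ (by simp at hps ⊢; omega)]
          simp


-- ===== VERDICT (by name: the statement is the Claim_ definition above) =====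
theorem display_info_spec : Claim_equal_display_info := by
  intro lv tr ps _ hPre
  obtain ⟨h1, h2⟩ := hPre
  unfold Spec_display_info
  simp only [display_info, display_info_alt]
  rw [PySem.List.pyRange_zero_natCast]
  rw [pvHdr_foldl lv tr tr.length le_rfl h1 [] []]
  have htake : (tr.zip lv).take tr.length = tr.zip lv :=
    List.take_of_length_le (by simp [List.length_zip])
  simp only [List.nil_append]
  rw [htake]
  rw [pvSepEq lv tr.length]
  rw [pvRowEq lv tr]
  rw [PySem.List.slice_to lv (Int.natCast_nonneg tr.length), Int.toNat_natCast]
  have hl := pvLoop_foldl lv (String.ofList (pvRowB lv tr))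
    (String.ofList ('+' :: ((lv.take tr.length).map
      (fun w => List.replicate (w + 2).toNat '-' ++ ['+'])).flatten)) ps 0
    [String.ofList ('+' :: ((lv.take tr.length).map
      (fun w => List.replicate (w + 2).toNat '-' ++ ['+'])).flatten)]
  rw [Nat.cast_zero] at hl
  rw [hl]
  have hcongr : ∀ p ∈ ps,
      (fun player => String.ofList (PySem.List.slice
          ((player.foldl (fun (q : List Char × Int) stat =>
              (q.1 ++ (" | ".toList ++ stat.toList
                  ++ pvRepA ' ' (PySem.List.pyGetD lv q.2 0 - (stat.toList.length : Int))),
               q.2 + 1)) ([], 0)).1 ++ " |".toList) (some 1) none)) p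
        = (fun player => String.ofList (pvRowB lv player)) p := by
    intro p hp
    simp only
    rw [pvRowA0 lv p (h2 p hp), pvRowEq lv p]
  rw [pvGoA_congr _ _ _ _ ps 0 hcongr]
  rw [pvGoA_pages _ _ _ ps.length ps le_rfl]
  simp
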